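-- pv_equiv track=rewrite | github.com/Kalvalna/Spring-2016-Coursework | COSC1306/inClassAssignment5.py | fantastic
-- ===== SOURCE A (Python) =====
-- def fantastic(input):
--     if input.count('good') > 0:
--         while input.count('good') > 0:
--             input.insert(input.index('good'), 'fantastic')
--             input.remove('good')
--     if input.count('acceptable') > 0:
--         while input.count('acceptable') > 0:
--             input.insert(input.index('acceptable'), 'fantastic')
--             input.remove('acceptable')
--     input = " ".join(input)
--     return input
-- ===== SOURCE B (Python) =====
-- def fantastic(input):
--     for i, x in enumerate(input):
--         if x == 'good' or x == 'acceptable':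
--             input[i] = 'fantastic'
--     return " ".join(input)
-- ===== Notes on version B (the rewrite author's own statement) =====
-- stated objective: simpler
-- what changed: Replaces A's count/while/index/insert/remove repeated scanning with a single in-place enumerate pass that overwrites 'good'/'acceptable' slots, then joins.
import Mathlib
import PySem

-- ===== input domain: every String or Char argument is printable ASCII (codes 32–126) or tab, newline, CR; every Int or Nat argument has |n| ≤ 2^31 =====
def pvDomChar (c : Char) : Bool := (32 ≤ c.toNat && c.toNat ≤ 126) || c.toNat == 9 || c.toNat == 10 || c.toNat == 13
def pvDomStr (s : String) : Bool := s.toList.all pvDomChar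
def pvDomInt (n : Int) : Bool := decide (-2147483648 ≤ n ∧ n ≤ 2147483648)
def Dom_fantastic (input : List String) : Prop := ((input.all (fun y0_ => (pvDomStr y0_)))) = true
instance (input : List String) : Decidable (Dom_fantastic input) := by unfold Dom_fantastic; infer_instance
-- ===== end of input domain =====

-- B replaces A's repeated count/index/insert/remove scanning by a single in-place pass; both
-- mutate the caller's list to the same final contents, the theorems are about the return value.

-- ===== PORT A =====
-- One step of A's while body applied to l = pre ++ t :: suf (t ∉ pre) yields pre ++ "fantastic" :: suf.
theorem pvStep_eq (t : String) (ht : t ≠ "fantastic") (l : List String)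
    (h : 0 < PySem.List.count l t) :
    ∃ pre suf, t ∉ pre ∧ l = pre ++ t :: suf ∧
      (let i := (PySem.List.index? l t).getD 0
       let l1 := PySem.List.insert l (i : Int) "fantastic"
       (PySem.List.remove? l1 t).getD l1) = pre ++ "fantastic" :: suf := by
  have hmem : t ∈ l := by
    rw [PySem.List.count_eq] at h; exact List.count_pos_iff.mp h
  obtain ⟨i, hi⟩ := Option.isSome_iff_exists.mp ((PySem.List.index?_isSome_iff l t).mpr hmem)
  obtain ⟨pre, suf, hl, hlen, hpre⟩ := (PySem.List.index?_eq_some_iff l t i).mp hi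
  refine ⟨pre, suf, hpre, hl, ?_⟩
  have hile : i ≤ l.length := by subst hl; simp [← hlen]
  have h1 : PySem.List.insert l (i : Int) "fantastic" = l.take i ++ "fantastic" :: l.drop i :=
    PySem.List.insert_natCast l i "fantastic" hile
  have htake : l.take i = pre := by subst hl; rw [← hlen]; exact List.take_left
  have hdrop : l.drop i = t :: suf := by subst hl; rw [← hlen]; exact List.drop_left
  have h1' : PySem.List.insert l (i : Int) "fantastic" = pre ++ "fantastic" :: t :: suf := by
    rw [h1, htake, hdrop]
  have hmem1 : t ∈ pre ++ "fantastic" :: t :: suf := by simp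
  have h2 : PySem.List.remove? (pre ++ "fantastic" :: t :: suf) t
      = some ((pre ++ "fantastic" :: t :: suf).erase t) :=
    PySem.List.remove?_eq_some_erase _ t hmem1
  have herase : (pre ++ "fantastic" :: t :: suf).erase t = pre ++ "fantastic" :: suf := by
    rw [List.erase_append_right _ hpre]
    simp [Ne.symm ht]
  simp only [hi, Option.getD_some, h1', h2, herase]

theorem pvStep_count_lt (t : String) (ht : t ≠ "fantastic") (l : List String)
    (h : 0 < PySem.List.count l t) :
    PySem.List.count
      (let i := (PySem.List.index? l t).getD 0
       let l1 := PySem.List.insert l (i : Int) "fantastic"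
       (PySem.List.remove? l1 t).getD l1) t < PySem.List.count l t := by
  obtain ⟨pre, suf, hpre, hl, hstep⟩ := pvStep_eq t ht l h
  rw [hstep, hl]
  simp [PySem.List.count_eq, List.count_append, Ne.symm ht]

-- A's while loop for target t ('good' / 'acceptable'): insert 'fantastic' before the first t,
-- remove the first t, repeat while t is still present.
def pvReplLoop (t : String) (ht : t ≠ "fantastic") (l : List String) : List String :=
  if h : 0 < PySem.List.count l t then
    pvReplLoop t ht
      (let i := (PySem.List.index? l t).getD 0
       let l1 := PySem.List.insert l (i : Int) "fantastic"
       (PySem.List.remove? l1 t).getD l1)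
  else l
termination_by PySem.List.count l t
decreasing_by exact pvStep_count_lt t ht l h

def fantastic (input : List String) : String :=
  let a := if 0 < PySem.List.count input "good"
           then pvReplLoop "good" (by decide) input else input
  let b := if 0 < PySem.List.count a "acceptable"
           then pvReplLoop "acceptable" (by decide) a else a
  PySem.Str.join " " b

-- ===== PORT B =====
-- B: one pass overwriting each 'good'/'acceptable' slot with 'fantastic', then join.
def fantastic_alt (input : List String) : String :=
  PySem.Str.join " "
    (input.map (fun x => if x == "good" || x == "acceptable" then "fantastic" else x))

-- ===== PRECONDITION & SPEC =====
def Spec_fantastic (input : List String) (out : String) : Prop := out = fantastic_alt input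
instance (input : List String) (out : String) : Decidable (Spec_fantastic input out) := by unfold Spec_fantastic; infer_instance

-- ===== CLAIM (what is proved, stated in full; the proofs are below) =====
def Claim_equal_fantastic : Prop := ∀ (input : List String), Dom_fantastic input → Spec_fantastic input (fantastic input)

-- ===== LEMMAS AND PROOFS =====
theorem pvReplLoop_eq_map (t : String) (ht : t ≠ "fantastic") (l : List String) :
    pvReplLoop t ht l = l.map (fun x => if x == t then "fantastic" else x) := by
  induction hn : PySem.List.count l t using Nat.strong_induction_on generalizing l with
  | _ n ih =>
    rw [pvReplLoop]
    split_ifs with h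
    · obtain ⟨pre, suf, hpre, hl, hstep⟩ := pvStep_eq t ht l h
      have hlt := pvStep_count_lt t ht l h
      rw [hstep] at hlt ⊢
      rw [ih _ (hn ▸ hlt) _ rfl, hl]
      simp only [List.map_append, List.map_cons]
      have hf : ("fantastic" == t) = false := by
        simp [beq_eq_false_iff_ne, Ne.symm ht]
      simp [hf]
    · have hnot : t ∉ l := by
        rw [PySem.List.count_eq] at h
        intro hm; exact h (List.count_pos_iff.mpr hm)
      rw [List.map_congr_left (fun x hx => ?_), List.map_id]
      have : (x == t) = false := by
        simp only [beq_eq_false_iff_ne]; rintro rfl; exact hnot hx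
      simp [this]

theorem pvIf_eq_map (t : String) (ht : t ≠ "fantastic") (l : List String) :
    (if 0 < PySem.List.count l t then pvReplLoop t ht l else l)
      = l.map (fun x => if x == t then "fantastic" else x) := by
  split_ifs with h
  · exact pvReplLoop_eq_map t ht l
  · have hnot : t ∉ l := by
      rw [PySem.List.count_eq] at h
      intro hm; exact h (List.count_pos_iff.mpr hm)
    rw [List.map_congr_left (fun x hx => ?_), List.map_id]
    have : (x == t) = false := by
      simp only [beq_eq_false_iff_ne]; rintro rfl; exact hnot hx
    simp [this]

-- ===== VERDICT (by name: the statement is the Claim_ definition above) =====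
theorem fantastic_spec : Claim_equal_fantastic := by
  intro input _
  unfold Spec_fantastic fantastic fantastic_alt
  simp only [pvIf_eq_map "good" (by decide), pvIf_eq_map "acceptable" (by decide), List.map_map]
  congr 1
  apply List.map_congr_left
  intro x _
  by_cases hg : x = "good" <;> by_cases ha : x = "acceptable" <;>
    simp [Function.comp, hg, ha]
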